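-- pv_equiv track=rewrite | github.com/zzHtCzz/CODE_Student | Python/dict_gomnhom.py | gom_nhom_tu
-- ===== SOURCE A (Python) =====
-- def gom_nhom_tu(danhSach):
--     dictKetQua = {}
--     for tu in danhSach:
--         if tu in dictKetQua:
--             dictKetQua[tu].append(tu)
--         else:
--             dictKetQua[tu] = [tu]
--     return dictKetQua
-- ===== SOURCE B (Python) =====
-- from collections import Counter
--
-- def gom_nhom_tu(danhSach):
--     c = Counter(danhSach)
--     return {tu: [tu] * n for tu, n in c.items()}
-- ===== Notes on version B (the rewrite author's own statement) =====
-- stated objective: idiomatic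
-- what changed: B tallies occurrences with collections.Counter in one pass and then builds each group by list multiplication [tu]*n in a dict comprehension, instead of A's per-occurrence append into a growing dict of lists.
import Mathlib
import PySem

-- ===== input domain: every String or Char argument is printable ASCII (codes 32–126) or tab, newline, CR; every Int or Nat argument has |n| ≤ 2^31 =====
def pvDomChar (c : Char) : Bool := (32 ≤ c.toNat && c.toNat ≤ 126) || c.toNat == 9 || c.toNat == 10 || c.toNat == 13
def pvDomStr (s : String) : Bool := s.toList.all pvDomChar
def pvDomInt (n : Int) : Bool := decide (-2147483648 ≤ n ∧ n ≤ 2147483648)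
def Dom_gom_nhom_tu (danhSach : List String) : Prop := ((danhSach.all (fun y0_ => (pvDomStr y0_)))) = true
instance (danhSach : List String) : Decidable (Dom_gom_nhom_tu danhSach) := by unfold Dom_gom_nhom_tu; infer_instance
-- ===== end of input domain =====

-- B counts occurrences first (Counter) and builds each group by replication, instead of A's per-occurrence append; same result, same O(n) cost.
-- ===== PORT A =====
def gom_nhom_tu (danhSach : List String) : List (String × List String) :=
  (danhSach.foldl
    (fun d tu =>
      if d.contains tu then d.modify tu [] (fun l => l ++ [tu])
      else d.insert tu [tu])
    PySem.Dict.empty).items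

-- ===== PORT B =====
def gom_nhom_tu_alt (danhSach : List String) : List (String × List String) :=
  (PySem.Dict.counter danhSach).items.map (fun p => (p.1, List.replicate p.2.toNat p.1))

-- ===== PRECONDITION & SPEC =====
def Spec_gom_nhom_tu (danhSach : List String) (out : List (String × List String)) : Prop := out = gom_nhom_tu_alt danhSach
instance (danhSach : List String) (out : List (String × List String)) : Decidable (Spec_gom_nhom_tu danhSach out) := by unfold Spec_gom_nhom_tu; infer_instance

-- ===== CLAIM (what is proved, stated in full; the proofs are below) =====
def Claim_equal_gom_nhom_tu : Prop := ∀ (danhSach : List String), Dom_gom_nhom_tu danhSach → Spec_gom_nhom_tu danhSach (gom_nhom_tu danhSach)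

-- ===== LEMMAS AND PROOFS =====

-- ===== VERDICT (by name: the statement is the Claim_ definition above) =====
-- A's loop step is extensionally 'modify tu [] (· ++ [tu])' in both branches.
theorem step_eq (d : PySem.Dict String (List String)) (tu : String) :
    (if d.contains tu then d.modify tu [] (fun l => l ++ [tu]) else d.insert tu [tu])
      = d.modify tu [] (fun l => l ++ [tu]) := by
  by_cases h : d.contains tu = true
  · simp [h]
  · simp only [Bool.not_eq_true] at h
    simp [h, PySem.Dict.modify, PySem.Dict.getD_of_not_contains]

theorem gom_nhom_tu_spec : Claim_equal_gom_nhom_tu := by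
  intro xs _
  unfold Spec_gom_nhom_tu gom_nhom_tu gom_nhom_tu_alt
  have hfold : xs.foldl
      (fun d tu => if d.contains tu then d.modify tu [] (fun l => l ++ [tu]) else d.insert tu [tu])
      PySem.Dict.empty
      = xs.foldl (fun d tu => d.modify tu [] (fun l => l ++ [tu])) PySem.Dict.empty := by
    congr 1
    funext d tu
    exact step_eq d tu
  rw [hfold, PySem.Dict.items_counter]
  have hnd : (xs.foldl (fun d tu => d.modify tu [] (fun l => l ++ [tu])) PySem.Dict.empty).keys.Nodup := by
    exact PySem.Dict.nodup_keys_foldl_modify_key xs id [] (fun d x l => l ++ [x]) _ PySem.Dict.nodup_keys_empty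
  rw [PySem.Dict.items_eq_map_keys _ hnd []]
  have hkeys : (xs.foldl (fun d tu => d.modify tu [] (fun l => l ++ [tu])) PySem.Dict.empty).keys
      = PySem.Set.ofList xs := by
    rw [PySem.Dict.keys_foldl_modify]
    simp [PySem.Set.update_nil_left, PySem.Dict.keys_empty]
  rw [hkeys, List.map_map]
  refine List.map_congr_left (fun k _ => ?_)
  have hpairs : xs.foldl (fun d tu => d.modify tu [] (fun l => l ++ [tu])) PySem.Dict.empty
      = (xs.map (fun x => (x, x))).foldl (fun d p => d.modify p.1 [] (fun l => l ++ [p.2])) PySem.Dict.empty := by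
    rw [List.foldl_map]
  have hgetD : (xs.foldl (fun d tu => d.modify tu [] (fun l => l ++ [tu])) PySem.Dict.empty).getD k []
      = List.replicate (xs.count k) k := by
    rw [hpairs, PySem.Dict.getD_foldl_modify_append]
    simp [List.filter_map, Function.comp_def, List.filter_beq, List.map_replicate]
  simp [hgetD]
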